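-- pv_equiv track=rewrite | github.com/wav35/cereal | utilities.py | transform_figlets
-- ===== SOURCE A (Python) =====
-- def transform_figlets(fig: str) -> list[list[int]]:
--     """
--     Converts a figlet string to an array, setting
--     a '1' where there is a '#' symbol and 0
--     otherwise
--     """
--     array: list[list[int]] = [[]]
--     array_counter = 0
--     for char in fig:
--         if char == "\n":
--             array.append([])
--             array_counter += 1
--         elif char == "#":
--             array[array_counter].append(1)
--         else:
--             array[array_counter].append(0)
--
--     return array
-- ===== SOURCE B (Python) =====
-- def transform_figlets(fig: str) -> list[list[int]]:
--     """
--     Converts a figlet string to an array, setting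
--     a '1' where there is a '#' symbol and 0
--     otherwise
--     """
--     rows = []
--     start = 0
--     n = len(fig)
--     while True:
--         nl = fig.find("\n", start)
--         end = n if nl == -1 else nl
--         row = [0] * (end - start)
--         j = start
--         while True:
--             k = fig.find("#", j, end)
--             if k == -1:
--                 break
--             row[k - start] = 1
--             j = k + 1
--         rows.append(row)
--         if nl == -1:
--             return rows
--         start = nl + 1
-- ===== Notes on version B (the rewrite author's own statement) =====
-- stated objective: faster
-- what changed: Replaces A's per-character Python-level classification loop (array + array_counter + in-place appends) by str.find-driven scanning: each line is delimited by find on the newline character, allocated at once as a zero-filled row, and has ones punched at the hash positions located by repeated bounded find calls, moving the character scans into C-level find.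
import Mathlib
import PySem

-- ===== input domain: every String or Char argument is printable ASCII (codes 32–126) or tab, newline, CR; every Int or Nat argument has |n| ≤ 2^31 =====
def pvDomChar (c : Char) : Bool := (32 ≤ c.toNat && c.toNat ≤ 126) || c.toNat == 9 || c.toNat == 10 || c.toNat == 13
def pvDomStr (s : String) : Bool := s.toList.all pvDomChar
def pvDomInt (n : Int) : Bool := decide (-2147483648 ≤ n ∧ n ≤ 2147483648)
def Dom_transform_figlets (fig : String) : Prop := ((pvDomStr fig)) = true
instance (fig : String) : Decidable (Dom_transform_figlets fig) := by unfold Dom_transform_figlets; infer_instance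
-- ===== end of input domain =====

-- B replaces A's per-character classification loop by str.find-driven scanning: newlines located
-- by find delimit each line, which is allocated as a zero row and has 1s punched at the '#'
-- positions located by repeated bounded find calls (measured constant-factor speedup).

-- ===== PORT A =====
-- one step of A's loop body: the '\n' / '#' / other branches, in order
def figStep (st : List (List Int) × Nat) (char : Char) : List (List Int) × Nat :=
  if char = '\n' then (st.1 ++ [[]], st.2 + 1)
  else if char = '#' then (st.1.modify st.2 (fun row => row ++ [(1 : Int)]), st.2)
  else (st.1.modify st.2 (fun row => row ++ [(0 : Int)]), st.2)

def transform_figlets (fig : String) : List (List Int) :=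
  (fig.toList.foldl figStep ([[]], 0)).1

-- ===== PORT B =====
-- fig.find(c, i, stop): first index of c in [i, stop), none for Python's -1
def findCh (cs : List Char) (c : Char) (i stop : Nat) : Option Nat :=
  if _h : i < stop then
    if cs[i]? = some c then some i else findCh cs c (i + 1) stop
  else none
termination_by stop - i

-- bounds fact about findCh, cited by the ports' termination proofs
theorem findCh_lt {cs : List Char} {c : Char} {i stop k : Nat}
    (h : findCh cs c i stop = some k) : i ≤ k ∧ k < stop := by
  fun_induction findCh cs c i stop with
  | case1 i h1 h2 => exact (Option.some_inj.mp h) ▸ ⟨le_refl _, h1⟩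
  | case2 i h1 h2 ih => have := ih h; omega
  | case3 i h1 => exact absurd h (by simp)

-- Source B's inner while loop: punch a 1 at each '#' position found in [j, stop)
def punchFrom (cs : List Char) (start stop : Nat) (row : List Int) (j : Nat) : List Int :=
  match h : findCh cs '#' j stop with
  | none => row
  | some k => punchFrom cs start stop (row.set (k - start) 1) (k + 1)
termination_by stop - j
decreasing_by have := findCh_lt h; omega

-- Source B's outer while loop: one iteration per line, delimited by the next newline (or the end)
def outerRows (cs : List Char) (start : Nat) : List (List Int) :=
  match h : findCh cs '\n' start cs.length with
  | none => [punchFrom cs start cs.length (List.replicate (cs.length - start) 0) start]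
  | some n => punchFrom cs start n (List.replicate (n - start) 0) start :: outerRows cs (n + 1)
termination_by cs.length - start
decreasing_by have := findCh_lt h; omega

def transform_figlets_alt (fig : String) : List (List Int) :=
  outerRows fig.toList 0

-- ===== PRECONDITION & SPEC =====
def Spec_transform_figlets (fig : String) (out : List (List Int)) : Prop := out = transform_figlets_alt fig
instance (fig : String) (out : List (List Int)) : Decidable (Spec_transform_figlets fig out) := by unfold Spec_transform_figlets; infer_instance

-- ===== CLAIM (what is proved, stated in full; the proofs are below) =====
def Claim_equal_transform_figlets : Prop := ∀ (fig : String), Dom_transform_figlets fig → Spec_transform_figlets fig (transform_figlets fig)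

-- ===== LEMMAS AND PROOFS =====

-- the bit value of one character, and of one line
def bitCh (c : Char) : Int := if c = '#' then 1 else 0

def bitLine (line : List Char) : List Int := line.map bitCh

-- the bit row of the segment [j, stop) of cs
def bitSeg (cs : List Char) (j stop : Nat) : List Int := bitLine ((cs.drop j).take (stop - j))

-- ---- facts about findCh ----
theorem findCh_none_spec {cs : List Char} {c : Char} {i stop : Nat}
    (h : findCh cs c i stop = none) : ∀ m, i ≤ m → m < stop → cs[m]? ≠ some c := by
  fun_induction findCh cs c i stop with
  | case1 i h1 h2 => exact absurd h (by simp)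
  | case2 i h1 h2 ih =>
    intro m hm1 hm2 hc
    rcases Nat.eq_or_lt_of_le hm1 with rfl | hlt
    · exact h2 hc
    · exact ih h m hlt hm2 hc
  | case3 i h1 => intro m hm1 hm2; omega

theorem findCh_some_spec {cs : List Char} {c : Char} {i stop k : Nat}
    (h : findCh cs c i stop = some k) :
    cs[k]? = some c ∧ ∀ m, i ≤ m → m < k → cs[m]? ≠ some c := by
  fun_induction findCh cs c i stop with
  | case1 i h1 h2 =>
    obtain rfl : i = k := Option.some_inj.mp h
    exact ⟨h2, fun m hm1 hm2 _ => by omega⟩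
  | case2 i h1 h2 ih =>
    obtain ⟨hk, hmin⟩ := ih h
    have hik := findCh_lt h
    refine ⟨hk, fun m hm1 hm2 hc => ?_⟩
    rcases Nat.eq_or_lt_of_le hm1 with rfl | hlt
    · exact h2 hc
    · exact hmin m hlt hm2 hc
  | case3 i h1 => exact absurd h (by simp)

-- ---- a segment without '#' maps to zeros ----
theorem bitLine_zeros {l : List Char} (h : ∀ c ∈ l, c ≠ '#') :
    bitLine l = List.replicate l.length 0 := by
  induction l with
  | nil => rfl
  | cons a t ih =>
    simp only [bitLine, List.map, List.length_cons, List.replicate_succ]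
    rw [show bitCh a = 0 from by simp [bitCh, h a (List.mem_cons_self)]]
    exact congrArg _ (ih fun c hc => h c (List.mem_cons_of_mem _ hc))

theorem no_hash_take {cs : List Char} {j k : Nat} (hk : k ≤ cs.length)
    (h : ∀ m, j ≤ m → m < k → cs[m]? ≠ some '#') :
    ∀ c ∈ (cs.drop j).take (k - j), c ≠ '#' := by
  intro c hc
  obtain ⟨m, hm, rfl⟩ := List.getElem_of_mem hc
  have hm' : m < k - j := lt_of_lt_of_le hm (by simp [List.length_take])
  have hjm : j + m < cs.length := by
    have := List.length_take_le (k - j) (cs.drop j)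
    have h2 : (cs.drop j).length = cs.length - j := List.length_drop ..
    omega
  rw [List.getElem_take, List.getElem_drop]
  intro hcEq
  exact h (j + m) (by omega) (by omega) (by rw [List.getElem?_eq_getElem hjm, hcEq])

-- ---- splitting a bit segment at the first '#' ----
theorem bitSeg_split {cs : List Char} {j k stop : Nat}
    (hjk : j ≤ k) (hks : k < stop) (hs : stop ≤ cs.length)
    (hk : cs[k]? = some '#')
    (hno : ∀ m, j ≤ m → m < k → cs[m]? ≠ some '#') :
    bitSeg cs j stop = List.replicate (k - j) 0 ++ 1 :: bitSeg cs (k + 1) stop := by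
  have hkl : k < cs.length := lt_of_lt_of_le hks hs
  have hstep : (cs.drop j).take (stop - j)
      = (cs.drop j).take (k - j) ++ (cs.drop k).take (stop - k) := by
    rw [show stop - j = (k - j) + (stop - k) from by omega, List.take_add, List.drop_drop,
        show j + (k - j) = k from by omega]
  have hdropk : (cs.drop k).take (stop - k) = cs[k] :: (cs.drop (k + 1)).take (stop - (k + 1)) := by
    rw [show stop - k = (stop - (k + 1)) + 1 from by omega, List.drop_eq_getElem_cons hkl,
        List.take_succ_cons]
  have hkv : cs[k] = '#' := by
    have := List.getElem?_eq_getElem hkl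
    rw [this] at hk
    exact Option.some_inj.mp hk
  unfold bitSeg
  rw [hstep, hdropk, bitLine, List.map_append, List.map_cons]
  rw [show bitCh cs[k] = 1 from by simp [bitCh, hkv]]
  rw [show (List.map bitCh ((cs.drop j).take (k - j)) : List Int)
        = List.replicate (k - j) 0 from ?_]
  · rfl
  · have hz := bitLine_zeros (no_hash_take (le_of_lt hkl) hno)
    rw [bitLine] at hz
    rw [hz, List.length_take, List.length_drop]
    congr 1
    omega

-- ---- the inner punch loop computes the bit row of its segment ----
theorem punch_spec (cs : List Char) (start stop : Nat) (hs : stop ≤ cs.length) :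
    ∀ d j pref, stop - j ≤ d → start ≤ j → j ≤ stop → pref.length = j - start →
      punchFrom cs start stop (pref ++ List.replicate (stop - j) 0) j = pref ++ bitSeg cs j stop := by
  intro d
  induction d with
  | zero =>
    intro j pref hd h1 h2 h3
    have hjs : j = stop := by omega
    subst hjs
    rw [punchFrom]
    split
    · simp [bitSeg, bitLine]
    · next k hk =>
        rw [show findCh cs '#' j j = none from by rw [findCh]; simp] at hk
        exact absurd hk (by simp)
  | succ d ih =>
    intro j pref hd h1 h2 h3
    rw [punchFrom]
    cases hf : findCh cs '#' j stop with
    | none =>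
      simp only []
      have hno := findCh_none_spec hf
      unfold bitSeg
      rw [bitLine_zeros (no_hash_take hs hno)]
      congr 1
      rw [List.length_take, List.length_drop]
      congr 1
      omega
    | some k =>
      simp only []
      obtain ⟨hjk, hks⟩ := findCh_lt hf
      obtain ⟨hkc, hno⟩ := findCh_some_spec hf
      have hset : (pref ++ List.replicate (stop - j) 0).set (k - start) 1
          = (pref ++ List.replicate (k - j) 0 ++ [1]) ++ List.replicate (stop - (k + 1)) 0 := by
        have hrep : (List.replicate (stop - j) (0 : Int))
            = List.replicate (k - j) 0 ++ 0 :: List.replicate (stop - (k + 1)) 0 := by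
          rw [show stop - j = (k - j) + (stop - (k + 1) + 1) from by omega,
              List.replicate_add, List.replicate_succ]
        rw [hrep, ← List.append_assoc,
            List.set_append_right _ _ (by simp [h3]; omega)]
        have hidx : k - start - (pref ++ List.replicate (k - j) (0 : Int)).length = 0 := by
          simp [h3]
          omega
        rw [hidx]
        simp
      rw [hset]
      have hcall := ih (k + 1) (pref ++ List.replicate (k - j) 0 ++ [1])
        (by omega) (by omega) (by omega) (by simp [h3]; omega)
      rw [hcall, bitSeg_split hjk hks hs hkc hno]
      simp

-- ---- splitOn facts ----
theorem splitOn_no_sep {c : Char} : ∀ {l : List Char}, c ∉ l → l.splitOn c = [l] := by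
  intro l
  induction l with
  | nil => intro _; rfl
  | cons a t ih =>
    intro h
    have ha : a ≠ c := fun hac => h (hac ▸ List.mem_cons_self)
    have ht : c ∉ t := fun hct => h (List.mem_cons_of_mem _ hct)
    rw [List.splitOn, List.splitOnP_cons]
    simp only [show (a == c) = false from by simp [ha], Bool.false_eq_true, if_false]
    rw [show t.splitOnP (· == c) = t.splitOn c from rfl, ih ht]
    rfl

theorem splitOn_sep {c : Char} : ∀ {l₁ l₂ : List Char}, c ∉ l₁ →
    (l₁ ++ c :: l₂).splitOn c = l₁ :: l₂.splitOn c := by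
  intro l₁
  induction l₁ with
  | nil =>
    intro l₂ _
    rw [List.nil_append, List.splitOn, List.splitOnP_cons]
    simp [List.splitOn]
  | cons a t ih =>
    intro l₂ h
    have ha : a ≠ c := fun hac => h (hac ▸ List.mem_cons_self)
    have ht : c ∉ t := fun hct => h (List.mem_cons_of_mem _ hct)
    rw [List.cons_append, List.splitOn, List.splitOnP_cons]
    simp only [show (a == c) = false from by simp [ha], Bool.false_eq_true, if_false]
    rw [show (t ++ c :: l₂).splitOnP (· == c) = (t ++ c :: l₂).splitOn c from rfl, ih ht]
    rfl

theorem not_mem_of_no_idx {cs : List Char} {c : Char} {j k : Nat} (hk : k ≤ cs.length)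
    (h : ∀ m, j ≤ m → m < k → cs[m]? ≠ some c) :
    c ∉ (cs.drop j).take (k - j) := by
  intro hc
  obtain ⟨m, hm, hEq⟩ := List.getElem_of_mem hc
  have hm' : m < k - j := lt_of_lt_of_le hm (by simp [List.length_take])
  have hjm : j + m < cs.length := by
    have h2 : (cs.drop j).length = cs.length - j := List.length_drop ..
    omega
  rw [List.getElem_take, List.getElem_drop] at hEq
  exact h (j + m) (by omega) (by omega) (by rw [List.getElem?_eq_getElem hjm, hEq])

-- ---- the outer loop computes splitOn mapped to bit rows ----
theorem outer_spec (cs : List Char) :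
    ∀ d start, cs.length - start ≤ d → start ≤ cs.length →
      outerRows cs start = ((cs.drop start).splitOn '\n').map bitLine := by
  intro d
  induction d with
  | zero =>
    intro start hd h1
    have hse : start = cs.length := by omega
    rw [outerRows]
    have hnone : findCh cs '\n' start cs.length = none := by rw [findCh]; simp [hse]
    rw [hnone]
    have hdrop : cs.drop start = [] := List.drop_eq_nil_of_le (by omega)
    have hp := punch_spec cs start cs.length (le_refl _) 0 start []
      (by omega) (le_refl _) (by omega) (by simp)
    simp only [List.nil_append] at hp
    rw [hp, hdrop]
    simp [bitSeg, hdrop, bitLine, List.splitOn]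
  | succ d ih =>
    intro start hd h1
    rw [outerRows]
    cases hf : findCh cs '\n' start cs.length with
    | none =>
      simp only []
      have hp := punch_spec cs start cs.length (le_refl _) (cs.length - start) start []
        (le_refl _) (le_refl _) h1 (by simp)
      simp only [List.nil_append] at hp
      rw [hp]
      have hno := findCh_none_spec hf
      have hnomem : '\n' ∉ cs.drop start := by
        have := not_mem_of_no_idx (c := '\n') (j := start) (le_refl cs.length) hno
        rwa [List.take_of_length_le (by simp)] at this
      rw [splitOn_no_sep hnomem]
      simp only [List.map]
      unfold bitSeg
      rw [List.take_of_length_le (by simp)]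
    | some n =>
      simp only []
      obtain ⟨hsn, hnl⟩ := findCh_lt hf
      obtain ⟨hnc, hno⟩ := findCh_some_spec hf
      have hp := punch_spec cs start n (le_of_lt hnl) (n - start) start []
        (le_refl _) (le_refl _) hsn (by simp)
      simp only [List.nil_append] at hp
      rw [hp]
      have hsplit : cs.drop start = (cs.drop start).take (n - start) ++ '\n' :: cs.drop (n + 1) := by
        have hnv : cs[n] = '\n' := by
          have := List.getElem?_eq_getElem hnl
          rw [this] at hnc
          exact Option.some_inj.mp hnc
        rw [← hnv, ← List.drop_eq_getElem_cons hnl]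
        rw [show cs.drop n = (cs.drop start).drop (n - start) from by
              rw [List.drop_drop]; congr 1; omega,
            List.take_append_drop]
      have hnomem : '\n' ∉ (cs.drop start).take (n - start) :=
        not_mem_of_no_idx (le_of_lt hnl) hno
      rw [hsplit, splitOn_sep hnomem]
      rw [ih (n + 1) (by omega) (by omega)]
      rfl

-- ---- A's loop characterisation (reused invariant) ----
theorem modify_append_singleton {α : Type} (pre : List α) (cur : α) (f : α → α) :
    (pre ++ [cur]).modify pre.length f = pre ++ [f cur] := by
  induction pre with
  | nil => rfl
  | cons a t ih =>
    show a :: ((t ++ [cur]).modify t.length f) = a :: (t ++ [f cur])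
    rw [ih]

theorem splitOn_exists_cons (cs : List Char) :
    ∃ l ls, cs.splitOn '\n' = l :: ls := by
  cases hsp : cs.splitOn '\n' with
  | nil => exact absurd hsp (List.splitOnP_ne_nil _ _)
  | cons a b => exact ⟨a, b, rfl⟩

theorem foldl_figStep (cs : List Char) (pre : List (List Int)) (cur : List Int) :
    (cs.foldl figStep (pre ++ [cur], pre.length)).1
      = pre ++ ((cs.splitOn '\n').map bitLine).modifyHead (fun l => cur ++ l) := by
  induction cs generalizing pre cur with
  | nil => simp [bitLine]
  | cons c cs ih =>
    rw [List.foldl_cons]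
    obtain ⟨l, ls, hs⟩ := splitOn_exists_cons cs
    simp only [List.splitOn] at hs
    by_cases h : c = '\n'
    · subst h
      have h1 : figStep (pre ++ [cur], pre.length) '\n'
          = ((pre ++ [cur]) ++ [[]], (pre ++ [cur]).length) := by
        simp [figStep]
      rw [h1, ih]
      simp [List.splitOn, hs, bitLine, List.append_assoc]
    · have h1 : figStep (pre ++ [cur], pre.length) c
          = (pre ++ [cur ++ [if c = '#' then (1 : Int) else 0]], pre.length) := by
        simp only [figStep, if_neg h]
        split_ifs <;> simp [modify_append_singleton]
      rw [h1, ih]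
      simp [List.splitOn, hs, h, bitLine, bitCh, List.append_assoc]

-- ===== VERDICT (by name: the statement is the Claim_ definition above) =====
theorem transform_figlets_spec : Claim_equal_transform_figlets := by
  intro fig _
  unfold Spec_transform_figlets transform_figlets transform_figlets_alt
  obtain ⟨l, ls, hs⟩ := splitOn_exists_cons fig.toList
  have hA := foldl_figStep fig.toList [] []
  have hB := outer_spec fig.toList fig.toList.length 0 (by omega) (by omega)
  simp only [List.drop_zero] at hB
  rw [hB]
  simpa [hs] using hA
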